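-- pv_equiv track=rewrite | github.com/josegarciav/event-intelligence-platform | src/ingestion/normalization/feature_extractor.py | _infer_primary_category_rules
-- ===== SOURCE A (Python) =====
-- from typing import Any, Dict, List, Optional, TYPE_CHECKING
--
-- def _infer_primary_category_rules(event_context: Dict[str, Any]) -> str:
--     """Rule-based primary category inference."""
--     title = (event_context.get("title") or "").lower()
--     description = (event_context.get("description") or "").lower()
--     text = f"{title} {description}"
--
--     # Category mapping based on keywords
--     if any(
--         w in text for w in ["concert", "music", "dj", "live", "techno", "house"]
--     ):
--         return "1"  # PLAY & PURE FUN
--     elif any(w in text for w in ["workshop", "class", "learn", "masterclass"]):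
--         return "2"  # LEARN & DISCOVER
--     elif any(w in text for w in ["meetup", "community", "network"]):
--         return "3"  # CONNECT & BELONG
--     elif any(w in text for w in ["art", "exhibition", "gallery", "museum"]):
--         return "4"  # CREATE & EXPRESS
--     elif any(w in text for w in ["fitness", "yoga", "sports", "run"]):
--         return "5"  # MOVE & THRIVE
--     elif any(w in text for w in ["food", "wine", "culinary", "tasting"]):
--         return "6"  # TASTE & SAVOR
--     elif any(w in text for w in ["nature", "outdoor", "hiking", "garden"]):
--         return "7"  # EXPLORE & WANDER
--     elif any(w in text for w in ["meditation", "wellness", "spa", "retreat"]):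
--         return "8"  # REST & RECHARGE
--     elif any(w in text for w in ["charity", "volunteer", "cause"]):
--         return "9"  # GIVE & IMPACT
--     elif any(w in text for w in ["festival", "celebration", "carnival"]):
--         return "10"  # CELEBRATE & COMMEMORATE
--     else:
--         return "1"  # Default to PLAY & PURE FUN
-- ===== SOURCE B (Python) =====
-- # Inverted index: one flat keyword -> category-number dict; the answer is the
-- # minimum category number among all matching keywords (rule order in A is
-- # exactly increasing category number, so first-match == min), default "1".
-- CATEGORY_OF_KEYWORD = {
--     "concert": 1, "music": 1, "dj": 1, "live": 1, "techno": 1, "house": 1,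
--     "workshop": 2, "class": 2, "learn": 2, "masterclass": 2,
--     "meetup": 3, "community": 3, "network": 3,
--     "art": 4, "exhibition": 4, "gallery": 4, "museum": 4,
--     "fitness": 5, "yoga": 5, "sports": 5, "run": 5,
--     "food": 6, "wine": 6, "culinary": 6, "tasting": 6,
--     "nature": 7, "outdoor": 7, "hiking": 7, "garden": 7,
--     "meditation": 8, "wellness": 8, "spa": 8, "retreat": 8,
--     "charity": 9, "volunteer": 9, "cause": 9,
--     "festival": 10, "celebration": 10, "carnival": 10,
-- }
--
-- def _infer_primary_category_rules(event_context):
--     title = (event_context.get("title") or "").lower()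
--     description = (event_context.get("description") or "").lower()
--     text = f"{title} {description}"
--     best = min((c for kw, c in CATEGORY_OF_KEYWORD.items() if kw in text), default=None)
--     return str(best) if best is not None else "1"
-- ===== Notes on version B (the rewrite author's own statement) =====
-- stated objective: alternative
-- what changed: Replaces the ten-branch if/elif chain of keyword groups by an inverted index (flat keyword -> category-number dict) reduced with min(): since A's rule order is exactly increasing category number, the first matching rule equals the minimum category among all matching keywords, with '1' as the default.
import Mathlib
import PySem

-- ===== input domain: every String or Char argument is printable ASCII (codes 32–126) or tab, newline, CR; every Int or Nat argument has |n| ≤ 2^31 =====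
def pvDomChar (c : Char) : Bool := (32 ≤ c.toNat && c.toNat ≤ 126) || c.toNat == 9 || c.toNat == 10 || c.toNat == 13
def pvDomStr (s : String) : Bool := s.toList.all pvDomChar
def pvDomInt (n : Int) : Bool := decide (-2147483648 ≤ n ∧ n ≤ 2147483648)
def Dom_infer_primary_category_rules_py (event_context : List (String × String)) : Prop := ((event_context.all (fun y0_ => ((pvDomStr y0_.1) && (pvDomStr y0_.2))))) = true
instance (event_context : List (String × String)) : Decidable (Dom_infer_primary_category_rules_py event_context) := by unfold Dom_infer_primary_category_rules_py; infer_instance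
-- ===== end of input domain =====

-- B replaces the ten-branch if/elif chain by a flat keyword -> category-number
-- index reduced with min() (rule order in A is exactly increasing category
-- number, so first-match = min); same return value; objective: alternative.

-- ===== PORT A =====
-- dict.get(k) or "" : first match in the association list, default ""
def pvGetA (event_context : List (String × String)) (k : String) : String :=
  match event_context.find? (fun p => p.1 == k) with
  | some p => p.2
  | none => ""

def infer_primary_category_rules_py (event_context : List (String × String)) : String :=
  let title := PySem.Str.lower (pvGetA event_context "title")
  let description := PySem.Str.lower (pvGetA event_context "description")
  -- f"{title} {description}" kept as a character list (PySem strings are exact on List Char)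
  let text : List Char := title.toList ++ ' ' :: description.toList
  if ["concert", "music", "dj", "live", "techno", "house"].any (fun w => PySem.Chars.isIn w.toList text) then "1"
  else if ["workshop", "class", "learn", "masterclass"].any (fun w => PySem.Chars.isIn w.toList text) then "2"
  else if ["meetup", "community", "network"].any (fun w => PySem.Chars.isIn w.toList text) then "3"
  else if ["art", "exhibition", "gallery", "museum"].any (fun w => PySem.Chars.isIn w.toList text) then "4"
  else if ["fitness", "yoga", "sports", "run"].any (fun w => PySem.Chars.isIn w.toList text) then "5"
  else if ["food", "wine", "culinary", "tasting"].any (fun w => PySem.Chars.isIn w.toList text) then "6"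
  else if ["nature", "outdoor", "hiking", "garden"].any (fun w => PySem.Chars.isIn w.toList text) then "7"
  else if ["meditation", "wellness", "spa", "retreat"].any (fun w => PySem.Chars.isIn w.toList text) then "8"
  else if ["charity", "volunteer", "cause"].any (fun w => PySem.Chars.isIn w.toList text) then "9"
  else if ["festival", "celebration", "carnival"].any (fun w => PySem.Chars.isIn w.toList text) then "10"
  else "1"

-- ===== PORT B =====
-- the flat keyword -> category-number dict of Source B, in insertion (= .items()) order
def pvCatOfKeyword : List (String × Int) :=
  [ ("concert", 1), ("music", 1), ("dj", 1), ("live", 1), ("techno", 1), ("house", 1),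
    ("workshop", 2), ("class", 2), ("learn", 2), ("masterclass", 2),
    ("meetup", 3), ("community", 3), ("network", 3),
    ("art", 4), ("exhibition", 4), ("gallery", 4), ("museum", 4),
    ("fitness", 5), ("yoga", 5), ("sports", 5), ("run", 5),
    ("food", 6), ("wine", 6), ("culinary", 6), ("tasting", 6),
    ("nature", 7), ("outdoor", 7), ("hiking", 7), ("garden", 7),
    ("meditation", 8), ("wellness", 8), ("spa", 8), ("retreat", 8),
    ("charity", 9), ("volunteer", 9), ("cause", 9),
    ("festival", 10), ("celebration", 10), ("carnival", 10) ]

def infer_primary_category_rules_py_alt (event_context : List (String × String)) : String :=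
  let title := PySem.Str.lower ((event_context.lookup "title").getD "")
  let description := PySem.Str.lower ((event_context.lookup "description").getD "")
  let text : List Char := title.toList ++ ' ' :: description.toList
  -- min((c for kw, c in CATEGORY_OF_KEYWORD.items() if kw in text), default=None)
  let best := PySem.List.min?
    ((pvCatOfKeyword.filter (fun p => PySem.Chars.isIn p.1.toList text)).map (fun p => p.2))
    (fun x => x)
  match best with
  | some b => PySem.Int.toStr b
  | none => "1"

-- ===== PRECONDITION & SPEC =====
def Spec_infer_primary_category_rules_py (event_context : List (String × String)) (out : String) : Prop := out = infer_primary_category_rules_py_alt event_context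
instance (event_context : List (String × String)) (out : String) : Decidable (Spec_infer_primary_category_rules_py event_context out) := by unfold Spec_infer_primary_category_rules_py; infer_instance

-- ===== CLAIM =====
def Claim_equal_infer_primary_category_rules_py : Prop := ∀ (event_context : List (String × String)), Dom_infer_primary_category_rules_py event_context → Spec_infer_primary_category_rules_py event_context (infer_primary_category_rules_py event_context)

-- ===== LEMMAS AND PROOFS =====
-- the two lookups agree: find?-projection = List.lookup
theorem pvGetA_eq_lookup (ec : List (String × String)) (k : String) :
    pvGetA ec k = (ec.lookup k).getD "" := by
  induction ec with
  | nil => rfl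
  | cons p rest ih =>
      cases p with
      | mk a b =>
          by_cases h : a = k
          · simp [pvGetA, List.find?, List.lookup, h]
          · have hb : (a == k) = false := by simp [h]
            have hb' : (k == a) = false := by simp [Ne.symm h]
            simp [pvGetA, List.find?, List.lookup, hb, hb'] at ih ⊢
            exact ih

-- one constant-valued group of the flat table, filtered by match and projected to its value
def pvF (tx : List Char) (g : List String) (v : Int) : List Int :=
  ((g.map (fun s => (s, v))).filter (fun p => PySem.Chars.isIn p.1.toList tx)).map (fun p => p.2)

theorem pvF_eq_replicate (tx : List Char) (g : List String) (v : Int) :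
    pvF tx g v = List.replicate ((g.filter (fun w => PySem.Chars.isIn w.toList tx)).length) v := by
  induction g with
  | nil => rfl
  | cons s g ih =>
      simp only [pvF, List.map_cons, List.filter_cons] at ih ⊢
      by_cases h : PySem.Chars.isIn s.toList tx
      · simp [h, List.replicate_succ, ih]
      · simp [h, ih]

theorem pvF_eq_nil_iff (tx : List Char) (g : List String) (v : Int) :
    pvF tx g v = [] ↔ g.any (fun w => PySem.Chars.isIn w.toList tx) = false := by
  rw [pvF_eq_replicate]
  simp [List.replicate_eq_nil_iff, List.length_eq_zero_iff, List.filter_eq_nil_iff,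
    List.any_eq_false]

theorem pvF_mem (tx : List Char) (g : List String) (v y : Int) (hy : y ∈ pvF tx g v) : y = v := by
  rw [pvF_eq_replicate] at hy
  exact List.eq_of_mem_replicate hy

theorem foldl_min_replicate (n : Nat) (v a : Int) :
    List.foldl min a (List.replicate n v) = if n = 0 then a else min a v := by
  induction n generalizing a with
  | zero => simp
  | succ n ih =>
      rw [List.replicate_succ, List.foldl_cons, ih]
      by_cases h : n = 0
      · simp [h]
      · simp [h, min_assoc]

-- folding min over a group is its `any`
theorem foldl_min_group (tx : List Char) (g : List String) (v a : Int) :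
    List.foldl min a (pvF tx g v) =
      if g.any (fun w => PySem.Chars.isIn w.toList tx) then min a v else a := by
  rw [pvF_eq_replicate, foldl_min_replicate]
  by_cases hg : g.any (fun w => PySem.Chars.isIn w.toList tx) = true
  · simp only [hg, if_true]
    rw [if_neg]
    intro hlen
    rw [List.length_eq_zero_iff, List.filter_eq_nil_iff] at hlen
    simp only [List.any_eq_true] at hg
    obtain ⟨w, hw, hmem⟩ := hg
    exact absurd hmem (by simpa using hlen w hw)
  · simp only [Bool.not_eq_true] at hg
    have hlen : (g.filter (fun w => PySem.Chars.isIn w.toList tx)).length = 0 := by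
      rw [List.length_eq_zero_iff, List.filter_eq_nil_iff]
      intro w hw
      simpa using List.any_eq_false.mp hg w hw
    simp [hg, hlen]

-- the flat table splits into the ten groups
theorem pvL_eq (tx : List Char) :
    (pvCatOfKeyword.filter (fun p => PySem.Chars.isIn p.1.toList tx)).map (fun p => p.2) =
      pvF tx ["concert", "music", "dj", "live", "techno", "house"] 1 ++
      pvF tx ["workshop", "class", "learn", "masterclass"] 2 ++
      pvF tx ["meetup", "community", "network"] 3 ++
      pvF tx ["art", "exhibition", "gallery", "museum"] 4 ++
      pvF tx ["fitness", "yoga", "sports", "run"] 5 ++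
      pvF tx ["food", "wine", "culinary", "tasting"] 6 ++
      pvF tx ["nature", "outdoor", "hiking", "garden"] 7 ++
      pvF tx ["meditation", "wellness", "spa", "retreat"] 8 ++
      pvF tx ["charity", "volunteer", "cause"] 9 ++
      pvF tx ["festival", "celebration", "carnival"] 10 := by
  simp only [pvF]
  rw [show pvCatOfKeyword =
      (["concert", "music", "dj", "live", "techno", "house"].map (fun s => (s, (1 : Int)))) ++
      (["workshop", "class", "learn", "masterclass"].map (fun s => (s, (2 : Int)))) ++
      (["meetup", "community", "network"].map (fun s => (s, (3 : Int)))) ++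
      (["art", "exhibition", "gallery", "museum"].map (fun s => (s, (4 : Int)))) ++
      (["fitness", "yoga", "sports", "run"].map (fun s => (s, (5 : Int)))) ++
      (["food", "wine", "culinary", "tasting"].map (fun s => (s, (6 : Int)))) ++
      (["nature", "outdoor", "hiking", "garden"].map (fun s => (s, (7 : Int)))) ++
      (["meditation", "wellness", "spa", "retreat"].map (fun s => (s, (8 : Int)))) ++
      (["charity", "volunteer", "cause"].map (fun s => (s, (9 : Int)))) ++
      (["festival", "celebration", "carnival"].map (fun s => (s, (10 : Int)))) from rfl]
  simp only [List.filter_append, List.map_append]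

-- both sides as functions of the ten group-match booleans
def pvChainB (b1 b2 b3 b4 b5 b6 b7 b8 b9 b10 : Bool) : String :=
  if b1 then "1" else if b2 then "2" else if b3 then "3" else if b4 then "4"
  else if b5 then "5" else if b6 then "6" else if b7 then "7" else if b8 then "8"
  else if b9 then "9" else if b10 then "10" else "1"

def pvMinB (b1 b2 b3 b4 b5 b6 b7 b8 b9 b10 : Bool) : String :=
  let a1 : Int := if b1 then min 11 1 else 11
  let a2 := if b2 then min a1 2 else a1
  let a3 := if b3 then min a2 3 else a2
  let a4 := if b4 then min a3 4 else a3
  let a5 := if b5 then min a4 5 else a4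
  let a6 := if b6 then min a5 6 else a5
  let a7 := if b7 then min a6 7 else a6
  let a8 := if b8 then min a7 8 else a7
  let a9 := if b9 then min a8 9 else a8
  let a10 := if b10 then min a9 10 else a9
  if b1 || b2 || b3 || b4 || b5 || b6 || b7 || b8 || b9 || b10 then PySem.Int.toStr a10 else "1"

theorem pvBridge : ∀ b1 b2 b3 b4 b5 b6 b7 b8 b9 b10 : Bool,
    pvChainB b1 b2 b3 b4 b5 b6 b7 b8 b9 b10 = pvMinB b1 b2 b3 b4 b5 b6 b7 b8 b9 b10 := by
  decide

-- min? over a nonempty list of values bounded by c is foldl min starting at c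
theorem min?_eq_foldl_of_bound (L : List Int) (c : Int) (hne : L ≠ [])
    (hb : ∀ y ∈ L, y ≤ c) :
    PySem.List.min? L (fun x => x) = some (L.foldl min c) := by
  cases L with
  | nil => exact absurd rfl hne
  | cons x t =>
      have hx : min c x = x := min_eq_right (hb x (by simp))
      rw [PySem.List.min?_id_cons]
      simp [List.foldl, hx]

-- B's min-reduction, expressed through the ten group-match booleans
theorem pvMin_eq (tx : List Char) :
    (match PySem.List.min?
        ((pvCatOfKeyword.filter (fun p => PySem.Chars.isIn p.1.toList tx)).map (fun p => p.2))
        (fun x => x) with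
     | some b => PySem.Int.toStr b
     | none => "1") =
    pvMinB (["concert", "music", "dj", "live", "techno", "house"].any (fun w => PySem.Chars.isIn w.toList tx))
      (["workshop", "class", "learn", "masterclass"].any (fun w => PySem.Chars.isIn w.toList tx))
      (["meetup", "community", "network"].any (fun w => PySem.Chars.isIn w.toList tx))
      (["art", "exhibition", "gallery", "museum"].any (fun w => PySem.Chars.isIn w.toList tx))
      (["fitness", "yoga", "sports", "run"].any (fun w => PySem.Chars.isIn w.toList tx))
      (["food", "wine", "culinary", "tasting"].any (fun w => PySem.Chars.isIn w.toList tx))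
      (["nature", "outdoor", "hiking", "garden"].any (fun w => PySem.Chars.isIn w.toList tx))
      (["meditation", "wellness", "spa", "retreat"].any (fun w => PySem.Chars.isIn w.toList tx))
      (["charity", "volunteer", "cause"].any (fun w => PySem.Chars.isIn w.toList tx))
      (["festival", "celebration", "carnival"].any (fun w => PySem.Chars.isIn w.toList tx)) := by
  rw [pvL_eq]
  by_cases hor : (["concert", "music", "dj", "live", "techno", "house"].any (fun w => PySem.Chars.isIn w.toList tx) ||
      ["workshop", "class", "learn", "masterclass"].any (fun w => PySem.Chars.isIn w.toList tx) ||
      ["meetup", "community", "network"].any (fun w => PySem.Chars.isIn w.toList tx) ||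
      ["art", "exhibition", "gallery", "museum"].any (fun w => PySem.Chars.isIn w.toList tx) ||
      ["fitness", "yoga", "sports", "run"].any (fun w => PySem.Chars.isIn w.toList tx) ||
      ["food", "wine", "culinary", "tasting"].any (fun w => PySem.Chars.isIn w.toList tx) ||
      ["nature", "outdoor", "hiking", "garden"].any (fun w => PySem.Chars.isIn w.toList tx) ||
      ["meditation", "wellness", "spa", "retreat"].any (fun w => PySem.Chars.isIn w.toList tx) ||
      ["charity", "volunteer", "cause"].any (fun w => PySem.Chars.isIn w.toList tx) ||
      ["festival", "celebration", "carnival"].any (fun w => PySem.Chars.isIn w.toList tx)) = true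
  · have hne : (pvF tx ["concert", "music", "dj", "live", "techno", "house"] 1 ++
        pvF tx ["workshop", "class", "learn", "masterclass"] 2 ++
        pvF tx ["meetup", "community", "network"] 3 ++
        pvF tx ["art", "exhibition", "gallery", "museum"] 4 ++
        pvF tx ["fitness", "yoga", "sports", "run"] 5 ++
        pvF tx ["food", "wine", "culinary", "tasting"] 6 ++
        pvF tx ["nature", "outdoor", "hiking", "garden"] 7 ++
        pvF tx ["meditation", "wellness", "spa", "retreat"] 8 ++
        pvF tx ["charity", "volunteer", "cause"] 9 ++
        pvF tx ["festival", "celebration", "carnival"] 10) ≠ [] := by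
      intro h
      simp only [List.append_eq_nil_iff, pvF_eq_nil_iff] at h
      obtain ⟨⟨⟨⟨⟨⟨⟨⟨⟨h1, h2⟩, h3⟩, h4⟩, h5⟩, h6⟩, h7⟩, h8⟩, h9⟩, h10⟩ := h
      rw [h1, h2, h3, h4, h5, h6, h7, h8, h9, h10] at hor
      simp at hor
    have hbound : ∀ y ∈ (pvF tx ["concert", "music", "dj", "live", "techno", "house"] 1 ++
        pvF tx ["workshop", "class", "learn", "masterclass"] 2 ++
        pvF tx ["meetup", "community", "network"] 3 ++
        pvF tx ["art", "exhibition", "gallery", "museum"] 4 ++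
        pvF tx ["fitness", "yoga", "sports", "run"] 5 ++
        pvF tx ["food", "wine", "culinary", "tasting"] 6 ++
        pvF tx ["nature", "outdoor", "hiking", "garden"] 7 ++
        pvF tx ["meditation", "wellness", "spa", "retreat"] 8 ++
        pvF tx ["charity", "volunteer", "cause"] 9 ++
        pvF tx ["festival", "celebration", "carnival"] 10), y ≤ (11 : Int) := by
      intro y hy
      simp only [List.mem_append] at hy
      rcases hy with ((((((((h | h) | h) | h) | h) | h) | h) | h) | h) | h <;>
        (have := pvF_mem _ _ _ _ h; omega)
    rw [min?_eq_foldl_of_bound _ 11 hne hbound]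
    simp only [List.foldl_append, foldl_min_group]
    simp only [pvMinB, hor, if_true]
  · simp only [Bool.or_eq_true, not_or, Bool.not_eq_true] at hor
    obtain ⟨⟨⟨⟨⟨⟨⟨⟨⟨h1, h2⟩, h3⟩, h4⟩, h5⟩, h6⟩, h7⟩, h8⟩, h9⟩, h10⟩ := hor
    rw [(pvF_eq_nil_iff tx _ 1).mpr h1, (pvF_eq_nil_iff tx _ 2).mpr h2,
        (pvF_eq_nil_iff tx _ 3).mpr h3, (pvF_eq_nil_iff tx _ 4).mpr h4,
        (pvF_eq_nil_iff tx _ 5).mpr h5, (pvF_eq_nil_iff tx _ 6).mpr h6,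
        (pvF_eq_nil_iff tx _ 7).mpr h7, (pvF_eq_nil_iff tx _ 8).mpr h8,
        (pvF_eq_nil_iff tx _ 9).mpr h9, (pvF_eq_nil_iff tx _ 10).mpr h10]
    have hnone : PySem.List.min?
        (([] : List Int) ++ [] ++ [] ++ [] ++ [] ++ [] ++ [] ++ [] ++ [] ++ []) (fun x => x) = none := by
      rw [PySem.List.min?_eq_none_iff]
      rfl
    rw [hnone]
    simp [pvMinB, h1, h2, h3, h4, h5, h6, h7, h8, h9, h10]

-- ===== VERDICT =====
theorem infer_primary_category_rules_py_spec : Claim_equal_infer_primary_category_rules_py := by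
  intro ec _
  unfold Spec_infer_primary_category_rules_py infer_primary_category_rules_py infer_primary_category_rules_py_alt
  rw [pvGetA_eq_lookup, pvGetA_eq_lookup]
  rw [show ∀ b1 b2 b3 b4 b5 b6 b7 b8 b9 b10 : Bool,
      (if b1 then "1" else if b2 then "2" else if b3 then "3" else if b4 then "4"
       else if b5 then "5" else if b6 then "6" else if b7 then "7" else if b8 then "8"
       else if b9 then "9" else if b10 then "10" else "1") =
      pvChainB b1 b2 b3 b4 b5 b6 b7 b8 b9 b10 from fun _ _ _ _ _ _ _ _ _ _ => rfl]
  rw [pvBridge]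
  exact (pvMin_eq _).symm
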